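-- pv_equiv track=rewrite | github.com/doocs/leetcode | solution/3200-3299/3269.Constructing Two Increasing Arrays/Solution.py | minLargest
-- ===== SOURCE A (Python) =====
-- from typing import List
--
-- def minLargest(nums1: List[int], nums2: List[int]) -> int:
--     def nxt(x: int, y: int) -> int:
--         return x + 1 if (x & 1 ^ y) == 1 else x + 2
--
--     m, n = len(nums1), len(nums2)
--     f = [[0] * (n + 1) for _ in range(m + 1)]
--     for i, x in enumerate(nums1, 1):
--         f[i][0] = nxt(f[i - 1][0], x)
--     for j, y in enumerate(nums2, 1):
--         f[0][j] = nxt(f[0][j - 1], y)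
--     for i, x in enumerate(nums1, 1):
--         for j, y in enumerate(nums2, 1):
--             f[i][j] = min(nxt(f[i - 1][j], x), nxt(f[i][j - 1], y))
--     return f[m][n]
-- ===== SOURCE B (Python) =====
-- def minLargest(nums1, nums2):
--     def nxt(x, y):
--         return x + 1 if (x & 1 ^ y) == 1 else x + 2
--
--     # top-down, demand-driven memoized evaluation of the dp recurrence,
--     # driven by an explicit worklist stack instead of filling a table bottom-up
--     m, n = len(nums1), len(nums2)
--     memo = {(0, 0): 0}
--     stack = [(m, n)]
--     while stack:
--         i, j = stack[-1]
--         if (i, j) in memo: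
--             stack.pop()
--             continue
--         deps = []
--         if i:
--             deps.append((i - 1, j))
--         if j:
--             deps.append((i, j - 1))
--         missing = [d for d in deps if d not in memo]
--         if missing:
--             stack.extend(missing)
--             continue
--         cands = []
--         if i:
--             cands.append(nxt(memo[(i - 1, j)], nums1[i - 1]))
--         if j:
--             cands.append(nxt(memo[(i, j - 1)], nums2[j - 1]))
--         memo[(i, j)] = min(cands)
--         stack.pop()
--     return memo[(m, n)]
-- ===== Notes on version B (the rewrite author's own statement) =====
-- stated objective: alternative
-- what changed: Replaces A's bottom-up fill of an (m+1)x(n+1) table via three index loops by a top-down, demand-driven memoized evaluation of the recurrence: a dict memo plus an explicit worklist stack that starts at (m, n), pushes unresolved dependencies, and computes a cell only once both its dependencies are memoized.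
import Mathlib
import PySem

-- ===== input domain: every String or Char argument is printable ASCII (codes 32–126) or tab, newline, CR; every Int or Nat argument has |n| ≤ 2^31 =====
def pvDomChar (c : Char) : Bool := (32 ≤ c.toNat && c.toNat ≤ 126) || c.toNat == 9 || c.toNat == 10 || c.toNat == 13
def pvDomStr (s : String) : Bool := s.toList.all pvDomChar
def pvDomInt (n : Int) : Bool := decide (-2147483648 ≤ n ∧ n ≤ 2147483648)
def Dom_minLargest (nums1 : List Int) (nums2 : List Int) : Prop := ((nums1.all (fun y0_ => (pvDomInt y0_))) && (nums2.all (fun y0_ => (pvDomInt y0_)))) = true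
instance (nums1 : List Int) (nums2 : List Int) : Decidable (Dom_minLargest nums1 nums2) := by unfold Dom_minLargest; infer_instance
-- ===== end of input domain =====

-- B replaces A's bottom-up table fill (three index loops over an (m+1)×(n+1) array) by a top-down,
-- demand-driven memoized evaluation of the same recurrence, driven by an explicit worklist stack.

-- nxt(x, y) = x + 1 if (x & 1 ^ y) == 1 else x + 2   (identical inner helper in both A and B)
def nxt (x y : Int) : Int :=
  if PySem.Int.bxor (PySem.Int.band x 1) y == 1 then x + 1 else x + 2

-- ===== PORT A =====
-- f[i][j] read / write; in A the indices are always in range and nonnegative, so getD/set with .toNat is exact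
def get2 (f : List (List Int)) (i j : Int) : Int := (f.getD i.toNat []).getD j.toNat 0
def set2 (f : List (List Int)) (i j : Int) (v : Int) : List (List Int) :=
  f.set i.toNat ((f.getD i.toNat []).set j.toNat v)

def minLargest (nums1 : List Int) (nums2 : List Int) : Int :=
  let m := nums1.length
  let n := nums2.length
  let f0 := List.replicate (m + 1) (List.replicate (n + 1) (0 : Int))
  let f1 := (PySem.List.enumerate nums1 1).foldl
    (fun f p => set2 f p.1 0 (nxt (get2 f (p.1 - 1) 0) p.2)) f0
  let f2 := (PySem.List.enumerate nums2 1).foldl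
    (fun f q => set2 f 0 q.1 (nxt (get2 f 0 (q.1 - 1)) q.2)) f1
  let f3 := (PySem.List.enumerate nums1 1).foldl
    (fun f p => (PySem.List.enumerate nums2 1).foldl
      (fun f q => set2 f p.1 q.1
        (min (nxt (get2 f (p.1 - 1) q.1) p.2) (nxt (get2 f p.1 (q.1 - 1)) q.2))) f) f2
  get2 f3 (m : Int) (n : Int)

-- ===== PORT B =====
-- B's cell indices are nonnegative Python ints and 'i - 1' only occurs under 'if i:', so Nat is exact.
-- deps = [] ; if i: deps.append((i-1, j)) ; if j: deps.append((i, j-1))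
def depsB (i j : Nat) : List (Nat × Nat) :=
  (if i ≠ 0 then [(i - 1, j)] else []) ++ (if j ≠ 0 then [(i, j - 1)] else [])

-- one iteration of B's 'while stack:' body (stack top is the list head; stack.extend(missing)
-- puts the LAST element of missing on top, hence missing.reverse ++ stack)
def bstep (nums1 nums2 : List Int) (memo : PySem.Dict (Nat × Nat) Int)
    (stack : List (Nat × Nat)) : PySem.Dict (Nat × Nat) Int × List (Nat × Nat) :=
  match stack with
  | [] => (memo, [])
  | (i, j) :: rest =>
    if memo.contains (i, j) then (memo, rest)
    else
      let missing := (depsB i j).filter (fun d => !(memo.contains d))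
      if missing ≠ [] then (memo, missing.reverse ++ (i, j) :: rest)
      else
        let cands := (if i ≠ 0 then [nxt (memo.getD (i - 1, j) 0) (nums1.getD (i - 1) 0)] else [])
          ++ (if j ≠ 0 then [nxt (memo.getD (i, j - 1) 0) (nums2.getD (j - 1) 0)] else [])
        -- min(cands); cands is never empty when this branch runs in the program (proved below),
        -- the .getD 0 default is a totality guard only
        (memo.insert (i, j) ((PySem.List.min? cands (fun v => v)).getD 0), rest)

-- the while loop; the fuel argument is ONLY a totality guard (proved sufficient below)
def bloop (nums1 nums2 : List Int) :
    Nat → PySem.Dict (Nat × Nat) Int × List (Nat × Nat) → PySem.Dict (Nat × Nat) Int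
  | 0, (memo, _) => memo
  | fuel + 1, (memo, stack) =>
    if stack = [] then memo
    else bloop nums1 nums2 fuel (bstep nums1 nums2 memo stack)

def minLargest_alt (nums1 : List Int) (nums2 : List Int) : Int :=
  let m := nums1.length
  let n := nums2.length
  -- memo = {(0, 0): 0}
  let init := (PySem.Dict.empty : PySem.Dict (Nat × Nat) Int).insert (0, 0) 0
  let memo := bloop nums1 nums2 (4 ^ (m + n + 1) + 1) (init, [(m, n)])
  -- memo[(m, n)]; always present when the loop ends (proved below), getD is exact
  memo.getD (m, n) 0

-- ===== PRECONDITION & SPEC =====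
def Spec_minLargest (nums1 : List Int) (nums2 : List Int) (out : Int) : Prop := out = minLargest_alt nums1 nums2
instance (nums1 : List Int) (nums2 : List Int) (out : Int) : Decidable (Spec_minLargest nums1 nums2 out) := by unfold Spec_minLargest; infer_instance

-- ===== CLAIM (what is proved, stated in full; the proofs are below) =====
def Claim_equal_minLargest : Prop := ∀ (nums1 : List Int) (nums2 : List Int), Dom_minLargest nums1 nums2 → Spec_minLargest nums1 nums2 (minLargest nums1 nums2)

-- ===== LEMMAS AND PROOFS =====

-- reference recurrence: dp i j = min largest value using first i of nums1, first j of nums2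
def dp (nums1 nums2 : List Int) : Nat → Nat → Int
  | 0, 0 => 0
  | i + 1, 0 => nxt (dp nums1 nums2 i 0) (nums1.getD i 0)
  | 0, j + 1 => nxt (dp nums1 nums2 0 j) (nums2.getD j 0)
  | i + 1, j + 1 =>
      min (nxt (dp nums1 nums2 i (j + 1)) (nums1.getD i 0))
          (nxt (dp nums1 nums2 (i + 1) j) (nums2.getD j 0))
  termination_by i j => (i, j)

-- table abstraction for A's 2D list: entry (i,j) holds dp i j where the flag c is set, else 0
def tbl (nums1 nums2 : List Int) (c : Nat → Nat → Bool) : List (List Int) :=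
  (List.range (nums1.length + 1)).map (fun i =>
    (List.range (nums2.length + 1)).map (fun j => if c i j then dp nums1 nums2 i j else 0))

lemma dp_zero_zero (nums1 nums2 : List Int) : dp nums1 nums2 0 0 = 0 := by
  rw [dp]

lemma dp_succ_zero (nums1 nums2 : List Int) (i : Nat) :
    dp nums1 nums2 (i + 1) 0 = nxt (dp nums1 nums2 i 0) (nums1.getD i 0) := by
  rw [dp]

lemma dp_zero_succ (nums1 nums2 : List Int) (j : Nat) :
    dp nums1 nums2 0 (j + 1) = nxt (dp nums1 nums2 0 j) (nums2.getD j 0) := by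
  rw [dp]

lemma dp_succ_succ (nums1 nums2 : List Int) (i j : Nat) :
    dp nums1 nums2 (i + 1) (j + 1) =
      min (nxt (dp nums1 nums2 i (j + 1)) (nums1.getD i 0))
          (nxt (dp nums1 nums2 (i + 1) j) (nums2.getD j 0)) := by
  rw [dp]

lemma length_tbl (nums1 nums2 : List Int) (c : Nat → Nat → Bool) :
    (tbl nums1 nums2 c).length = nums1.length + 1 := by
  simp [tbl]

lemma getElem_tbl (nums1 nums2 : List Int) (c : Nat → Nat → Bool) (i : Nat)
    (hi : i < nums1.length + 1) (h : i < (tbl nums1 nums2 c).length) :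
    (tbl nums1 nums2 c)[i] =
      (List.range (nums2.length + 1)).map (fun j => if c i j then dp nums1 nums2 i j else 0) := by
  simp [tbl]

lemma get2_tbl (nums1 nums2 : List Int) (c : Nat → Nat → Bool) (i j : Nat)
    (hi : i ≤ nums1.length) (hj : j ≤ nums2.length) (hc : c i j = true) :
    get2 (tbl nums1 nums2 c) (i : Int) (j : Int) = dp nums1 nums2 i j := by
  have h1 : i < (tbl nums1 nums2 c).length := by rw [length_tbl]; omega
  simp only [get2, Int.toNat_natCast]
  rw [List.getD_eq_getElem _ _ h1, getElem_tbl _ _ _ _ (by omega) h1,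
    List.getD_eq_getElem _ _ (by simpa using by omega)]
  simp [hc]

lemma set2_tbl (nums1 nums2 : List Int) (c : Nat → Nat → Bool) (i j : Nat)
    (hi : i ≤ nums1.length) (hj : j ≤ nums2.length) :
    set2 (tbl nums1 nums2 c) (i : Int) (j : Int) (dp nums1 nums2 i j) =
      tbl nums1 nums2 (fun i' j' => c i' j' || (i' == i && j' == j)) := by
  have h1 : i < (tbl nums1 nums2 c).length := by rw [length_tbl]; omega
  simp only [set2, Int.toNat_natCast]
  rw [List.getD_eq_getElem _ _ h1, getElem_tbl _ _ _ _ (by omega) h1]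
  apply List.ext_getElem
  · simp [tbl]
  · intro i' hA hB
    have hi' : i' < nums1.length + 1 := by simpa [tbl] using hB
    rw [List.getElem_set]
    rw [getElem_tbl _ _ _ _ hi' hB]
    split_ifs with hii
    · subst hii
      apply List.ext_getElem
      · simp
      · intro j' hC hD
        rw [List.getElem_set]
        simp only [List.getElem_map, List.getElem_range]
        by_cases hjj : j = j'
        · subst hjj; simp
        · have hb : (j' == j) = false := by simpa using Ne.symm hjj
          simp [hjj, hb]
    · simp only [getElem_tbl _ _ _ _ hi' _, List.map_inj_left]
      intro j' hj'
      have hb : (i' == i) = false := by simpa using Ne.symm hii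
      simp [hb]

lemma tbl_congr (nums1 nums2 : List Int) (c c' : Nat → Nat → Bool)
    (h : ∀ i ≤ nums1.length, ∀ j ≤ nums2.length, c i j = c' i j) :
    tbl nums1 nums2 c = tbl nums1 nums2 c' := by
  simp only [tbl]
  apply List.map_congr_left
  intro i hi
  apply List.map_congr_left
  intro j hj
  rw [h i (by simpa using Nat.lt_succ_iff.mp (List.mem_range.mp hi))
        j (Nat.lt_succ_iff.mp (List.mem_range.mp hj))]

lemma tbl_false (nums1 nums2 : List Int) :
    tbl nums1 nums2 (fun _ _ => false) =
      List.replicate (nums1.length + 1) (List.replicate (nums2.length + 1) (0 : Int)) := by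
  apply List.ext_getElem
  · simp [tbl]
  · intro i hA hB
    simp [tbl, List.map_const']

lemma drop_cons_facts (nums : List Int) (k : Nat) (x : Int) (xs : List Int)
    (h : nums.drop k = x :: xs) :
    k < nums.length ∧ nums.getD k 0 = x ∧ nums.drop (k + 1) = xs := by
  have hl : k < nums.length := by
    by_contra hc
    rw [List.drop_eq_nil_of_le (by omega)] at h
    simp at h
  have h0 : nums[k]? = some x := by
    have h1 : (nums.drop k)[0]? = some x := by rw [h]; rfl
    rw [List.getElem?_drop] at h1
    simpa using h1
  refine ⟨hl, ?_, ?_⟩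
  · rw [List.getD_eq_getElem?_getD, h0]; rfl
  · have : nums.drop (k + 1) = (nums.drop k).drop 1 := by
      rw [List.drop_drop]
    rw [this, h]; rfl

-- ==== B side: the worklist loop computes dp ====

-- invariant: every memoized value is the dp value of its cell
def InvB (nums1 nums2 : List Int) (memo : PySem.Dict (Nat × Nat) Int) : Prop :=
  ∀ i j : Nat, memo.contains (i, j) = true → memo.getD (i, j) 0 = dp nums1 nums2 i j

-- k iterations of bstep
def biter (nums1 nums2 : List Int) :
    Nat → PySem.Dict (Nat × Nat) Int × List (Nat × Nat) →
    PySem.Dict (Nat × Nat) Int × List (Nat × Nat)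
  | 0, s => s
  | k + 1, s => biter nums1 nums2 k (bstep nums1 nums2 s.1 s.2)

lemma biter_add (nums1 nums2 : List Int) (a b : Nat) (s) :
    biter nums1 nums2 (a + b) s = biter nums1 nums2 b (biter nums1 nums2 a s) := by
  induction a generalizing s with
  | zero => rw [Nat.zero_add]; rfl
  | succ a ih =>
    rw [show a + 1 + b = (a + b) + 1 by omega]
    simp only [biter]
    exact ih _

lemma depsB_sum (i j : Nat) (d : Nat × Nat) (h : d ∈ depsB i j) :
    d.1 + d.2 + 1 = i + j := by
  simp only [depsB, List.mem_append] at h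
  rcases h with h | h <;> split_ifs at h <;> simp_all <;> omega

lemma depsB_length (i j : Nat) : (depsB i j).length ≤ 2 := by
  simp only [depsB]
  split_ifs <;> simp

lemma InvB_insert_dp (nums1 nums2 : List Int) (memo : PySem.Dict (Nat × Nat) Int)
    (i j : Nat) (hInv : InvB nums1 nums2 memo) :
    InvB nums1 nums2 (memo.insert (i, j) (dp nums1 nums2 i j)) := by
  intro i' j' hc
  rw [PySem.Dict.getD_insert]
  split_ifs with he
  · rw [Prod.mk.injEq] at he
    rw [he.1, he.2]
  · apply hInv
    rw [PySem.Dict.contains_insert] at hc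
    simpa [he] using hc

-- when all deps are memoized, bstep computes exactly dp i j
lemma bstep_compute (nums1 nums2 : List Int) (memo : PySem.Dict (Nat × Nat) Int)
    (i j : Nat) (rest : List (Nat × Nat))
    (h1 : memo.contains (i, j) = false)
    (h2 : ∀ d ∈ depsB i j, memo.contains d = true)
    (hInv : InvB nums1 nums2 memo) :
    bstep nums1 nums2 memo ((i, j) :: rest) =
      (memo.insert (i, j) (dp nums1 nums2 i j), rest) := by
  have hm : (depsB i j).filter (fun d => !(memo.contains d)) = [] := by
    rw [List.filter_eq_nil_iff]
    intro d hd
    simp [h2 d hd]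
  simp only [bstep, h1, Bool.false_eq_true, if_false, hm, ne_eq, not_true_eq_false, if_false]
  rcases i with _ | i <;> rcases j with _ | j
  · simp [PySem.List.min?, dp_zero_zero]
  · have hc := h2 (0, j) (by simp [depsB])
    have hv := hInv 0 j hc
    simp only [Nat.succ_ne_zero, ne_eq, not_true_eq_false, if_false, if_true,
      not_false_eq_true, List.nil_append, Nat.add_sub_cancel]
    rw [hv, dp_zero_succ]
    simp [PySem.List.min?]
  · have hc := h2 (i, 0) (by simp [depsB])
    have hv := hInv i 0 hc
    simp only [Nat.succ_ne_zero, ne_eq, not_true_eq_false, if_false, if_true,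
      not_false_eq_true, List.append_nil, Nat.add_sub_cancel]
    rw [hv, dp_succ_zero]
    simp [PySem.List.min?]
  · have hc1 := h2 (i, j + 1) (by simp [depsB])
    have hc2 := h2 (i + 1, j) (by simp [depsB])
    have hv1 := hInv i (j + 1) hc1
    have hv2 := hInv (i + 1) j hc2
    simp only [Nat.succ_ne_zero, ne_eq, not_true_eq_false, not_false_eq_true, if_true,
      Nat.add_sub_cancel, List.singleton_append]
    rw [hv1, hv2, dp_succ_succ]
    rw [PySem.List.min?_id_cons]
    simp

lemma one_le_four_pow (s : Nat) : 1 ≤ 4 ^ s := Nat.one_le_pow _ _ (by norm_num)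

-- main resolution lemma: with a correct memo, the loop resolves the top cell within 4^(i+j+1) steps
lemma resolveB (nums1 nums2 : List Int) :
    ∀ s : Nat, ∀ i j : Nat, i + j = s →
    ∀ (memo : PySem.Dict (Nat × Nat) Int) (stack : List (Nat × Nat)),
      InvB nums1 nums2 memo →
      ∃ (k : Nat) (memo' : PySem.Dict (Nat × Nat) Int),
        k ≤ 4 ^ (i + j + 1) ∧
        biter nums1 nums2 k (memo, (i, j) :: stack) = (memo', stack) ∧
        InvB nums1 nums2 memo' ∧
        memo'.contains (i, j) = true ∧
        (∀ c, memo.contains c = true → memo'.contains c = true) := by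
  intro s
  induction s using Nat.strong_induction_on with
  | _ s IH =>
    -- helper: resolve a whole list of strictly smaller cells
    have listRes : ∀ (L : List (Nat × Nat)), (∀ d ∈ L, d.1 + d.2 < s) →
        ∀ (memo : PySem.Dict (Nat × Nat) Int) (stack : List (Nat × Nat)),
        InvB nums1 nums2 memo →
        ∃ (k : Nat) (memo' : PySem.Dict (Nat × Nat) Int),
          k ≤ L.length * 4 ^ s ∧
          biter nums1 nums2 k (memo, L ++ stack) = (memo', stack) ∧
          InvB nums1 nums2 memo' ∧
          (∀ d ∈ L, memo'.contains d = true) ∧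
          (∀ c, memo.contains c = true → memo'.contains c = true) := by
      intro L
      induction L with
      | nil =>
        intro _ memo stack hInv
        exact ⟨0, memo, by simp, rfl, hInv, by simp, fun _ h => h⟩
      | cons d L ihL =>
        intro hlt memo stack hInv
        have hd : d.1 + d.2 < s := hlt d (by simp)
        obtain ⟨k1, memo1, hk1, hb1, hI1, hc1, hmono1⟩ :=
          IH (d.1 + d.2) hd d.1 d.2 rfl memo (L ++ stack) hInv
        obtain ⟨k2, memo2, hk2, hb2, hI2, hcL, hmono2⟩ :=
          ihL (fun e he => hlt e (by simp [he])) memo1 stack hI1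
        refine ⟨k1 + k2, memo2, ?_, ?_, hI2, ?_, fun c hc => hmono2 c (hmono1 c hc)⟩
        · have h4 : 4 ^ (d.1 + d.2 + 1) ≤ 4 ^ s :=
            Nat.pow_le_pow_right (by norm_num) (by omega)
          calc k1 + k2 ≤ 4 ^ s + L.length * 4 ^ s := by omega
            _ = (d :: L).length * 4 ^ s := by simp [Nat.succ_mul]; ring
        · rw [biter_add]
          have : (memo, (d.1, d.2) :: (L ++ stack)) = (memo, d :: (L ++ stack)) := by simp
          rw [show ((d :: L) ++ stack : List (Nat × Nat)) = d :: (L ++ stack) by simp, ← this,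
            hb1, hb2]
        · intro e he
          rcases List.mem_cons.mp he with he | he
          · exact hmono2 _ (he ▸ hc1)
          · exact hcL e he
    intro i j hij memo stack hInv
    by_cases hc : memo.contains (i, j) = true
    · refine ⟨1, memo, ?_, ?_, hInv, hc, fun _ h => h⟩
      · exact one_le_four_pow _
      · simp only [biter, bstep, hc, if_true]
    · have hcf : memo.contains (i, j) = false := by simpa using hc
      set missing := (depsB i j).filter (fun d => !(memo.contains d)) with hmdef
      by_cases hm : missing = []
      · -- all deps memoized: one compute step
        have h2 : ∀ d ∈ depsB i j, memo.contains d = true := by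
          intro d hd
          by_contra hcd
          have : d ∈ missing := by
            rw [hmdef, List.mem_filter]
            exact ⟨hd, by simpa using hcd⟩
          rw [hm] at this
          simp at this
        refine ⟨1, memo.insert (i, j) (dp nums1 nums2 i j), ?_, ?_,
          InvB_insert_dp nums1 nums2 memo i j hInv,
          PySem.Dict.contains_insert_self _ _ _, ?_⟩
        · exact one_le_four_pow _
        · show biter nums1 nums2 1 (memo, (i, j) :: stack) = _
          simp only [biter]
          rw [bstep_compute nums1 nums2 memo i j stack hcf h2 hInv]
        · intro c hcc
          rw [PySem.Dict.contains_insert]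
          simp [hcc]
      · -- push the missing deps, resolve them, then compute
        have hstep : bstep nums1 nums2 memo ((i, j) :: stack) =
            (memo, missing.reverse ++ (i, j) :: stack) := by
          simp only [bstep, hcf, Bool.false_eq_true, if_false, ← hmdef, hm, ne_eq,
            not_false_eq_true, if_true]
        have hlt : ∀ d ∈ missing.reverse, d.1 + d.2 < s := by
          intro d hd
          rw [List.mem_reverse] at hd
          have := depsB_sum i j d (List.mem_of_mem_filter hd)
          omega
        obtain ⟨k1, memo1, hk1, hb1, hI1, hcL, hmono1⟩ :=
          listRes missing.reverse hlt memo ((i, j) :: stack) hInv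
        have hlen : missing.reverse.length ≤ 2 := by
          rw [List.length_reverse]
          exact le_trans (List.length_filter_le _ _) (depsB_length i j)
        -- after resolving, all deps of (i,j) are memoized in memo1
        have hdeps1 : ∀ d ∈ depsB i j, memo1.contains d = true := by
          intro d hd
          by_cases hcd : memo.contains d = true
          · exact hmono1 d hcd
          · apply hcL
            rw [List.mem_reverse, hmdef, List.mem_filter]
            exact ⟨hd, by simpa using hcd⟩
        by_cases hc1 : memo1.contains (i, j) = true
        · -- cell got memoized along the way: one pop step
          refine ⟨1 + k1 + 1, memo1, ?_, ?_, hI1, hc1, hmono1⟩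
          · have h4 : 4 ^ s ≥ 1 := one_le_four_pow s
            have : k1 ≤ 2 * 4 ^ s := le_trans hk1 (Nat.mul_le_mul_right _ hlen)
            calc 1 + k1 + 1 ≤ 2 + 2 * 4 ^ s := by omega
              _ ≤ 4 * 4 ^ s := by omega
              _ = 4 ^ (i + j + 1) := by rw [hij, pow_succ]; ring
          · rw [biter_add, biter_add]
            show biter nums1 nums2 1 ((biter nums1 nums2 k1) (biter nums1 nums2 1 _)) = _
            simp only [biter]
            rw [hstep, hb1]
            simp only [biter, bstep, hc1, if_true]
        · -- compute step with all deps present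
          have hc1f : memo1.contains (i, j) = false := by simpa using hc1
          refine ⟨1 + k1 + 1, memo1.insert (i, j) (dp nums1 nums2 i j), ?_, ?_,
            InvB_insert_dp nums1 nums2 memo1 i j hI1,
            PySem.Dict.contains_insert_self _ _ _, ?_⟩
          · have : k1 ≤ 2 * 4 ^ s := le_trans hk1 (Nat.mul_le_mul_right _ hlen)
            have h4 : 4 ^ s ≥ 1 := one_le_four_pow s
            calc 1 + k1 + 1 ≤ 2 + 2 * 4 ^ s := by omega
              _ ≤ 4 * 4 ^ s := by omega
              _ = 4 ^ (i + j + 1) := by rw [hij, pow_succ]; ring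
          · rw [biter_add, biter_add]
            show biter nums1 nums2 1 ((biter nums1 nums2 k1) (biter nums1 nums2 1 _)) = _
            simp only [biter]
            rw [hstep, hb1]
            simp only [biter]
            rw [bstep_compute nums1 nums2 memo1 i j stack hc1f hdeps1 hI1]
          · intro c hcc
            rw [PySem.Dict.contains_insert]
            simp [hmono1 c hcc]

lemma biter_nil (nums1 nums2 : List Int) (k : Nat) (memo : PySem.Dict (Nat × Nat) Int) :
    biter nums1 nums2 k (memo, []) = (memo, []) := by
  induction k with
  | zero => rfl
  | succ k ih => simp only [biter, bstep]; exact ih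

lemma bloop_of_biter (nums1 nums2 : List Int) :
    ∀ (k : Nat) (s : PySem.Dict (Nat × Nat) Int × List (Nat × Nat)),
      (biter nums1 nums2 k s).2 = [] → ∀ fuel, k ≤ fuel →
      bloop nums1 nums2 fuel s = (biter nums1 nums2 k s).1 := by
  intro k
  induction k with
  | zero =>
    intro s hs fuel _
    obtain ⟨memo, stack⟩ := s
    have : stack = [] := hs
    subst this
    cases fuel <;> simp [bloop, biter]
  | succ k ih =>
    intro s hs fuel hf
    obtain ⟨memo, stack⟩ := s
    by_cases hst : stack = []
    · subst hst
      have h1 : biter nums1 nums2 (k + 1) (memo, ([] : List (Nat × Nat))) = (memo, []) :=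
        biter_nil nums1 nums2 (k + 1) memo
      rw [h1]
      cases fuel <;> simp [bloop]
    · cases fuel with
      | zero => omega
      | succ f =>
        show bloop nums1 nums2 (f + 1) (memo, stack) = _
        simp only [bloop, hst, if_false]
        have h2 : biter nums1 nums2 (k + 1) (memo, stack) =
            biter nums1 nums2 k (bstep nums1 nums2 memo stack) := rfl
        rw [h2] at hs ⊢
        exact ih _ hs f (by omega)

lemma altB (nums1 nums2 : List Int) :
    minLargest_alt nums1 nums2 = dp nums1 nums2 nums1.length nums2.length := by
  simp only [minLargest_alt]
  set m := nums1.length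
  set n := nums2.length
  set init := (PySem.Dict.empty : PySem.Dict (Nat × Nat) Int).insert (0, 0) 0 with hinit
  have hInv0 : InvB nums1 nums2 init := by
    intro i j hc
    rw [hinit, PySem.Dict.contains_insert] at hc
    simp only [PySem.Dict.contains_empty, Bool.or_false, beq_iff_eq, Prod.mk.injEq] at hc
    rw [hc.1, hc.2, hinit, PySem.Dict.getD_insert]
    simp [dp_zero_zero]
  obtain ⟨k, memo', hk, hb, hI, hc, _⟩ :=
    resolveB nums1 nums2 (m + n) m n rfl init [] hInv0
  have hfin : (biter nums1 nums2 k (init, [(m, n)])).2 = [] := by rw [hb]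
  have hloop : bloop nums1 nums2 (4 ^ (m + n + 1) + 1) (init, [(m, n)]) = memo' := by
    rw [bloop_of_biter nums1 nums2 k _ hfin _ (by omega), hb]
  rw [hloop]
  exact hI m n hc

-- ==== A side: the 2D table, described by a flag function c telling which entries already hold dp ====

lemma get2_tbl' (nums1 nums2 : List Int) (c : Nat → Nat → Bool) (i j : Nat) (ii jj : Int)
    (hii : ii = (i : Int)) (hjj : jj = (j : Int))
    (hi : i ≤ nums1.length) (hj : j ≤ nums2.length) (hc : c i j = true) :
    get2 (tbl nums1 nums2 c) ii jj = dp nums1 nums2 i j := by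
  subst hii; subst hjj; exact get2_tbl nums1 nums2 c i j hi hj hc

lemma set2_tbl' (nums1 nums2 : List Int) (c : Nat → Nat → Bool) (i j : Nat) (ii jj : Int)
    (v : Int) (hii : ii = (i : Int)) (hjj : jj = (j : Int))
    (hi : i ≤ nums1.length) (hj : j ≤ nums2.length) (hv : v = dp nums1 nums2 i j) :
    set2 (tbl nums1 nums2 c) ii jj v =
      tbl nums1 nums2 (fun i' j' => c i' j' || (i' == i && j' == j)) := by
  subst hii; subst hjj; subst hv; exact set2_tbl nums1 nums2 c i j hi hj

lemma loopA1 (nums1 nums2 : List Int) :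
    ∀ (xs : List Int) (k : Nat) (s : Int), k ≤ nums1.length → nums1.drop k = xs →
      s = (k : Int) + 1 →
    (PySem.List.enumerate xs s).foldl
        (fun f p => set2 f p.1 0 (nxt (get2 f (p.1 - 1) 0) p.2))
        (tbl nums1 nums2 (fun i j => decide (j = 0 ∧ i ≤ k)))
      = tbl nums1 nums2 (fun i j => decide (j = 0)) := by
  intro xs
  induction xs with
  | nil =>
    intro k s hle hk hs
    have h2 : k = nums1.length := by have := List.drop_eq_nil_iff.mp hk; omega
    rw [PySem.List.enumerate_nil, List.foldl_nil]
    apply tbl_congr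
    intro i hi j hj
    rw [Bool.eq_iff_iff]; simp only [decide_eq_true_eq]; omega
  | cons x xs ih =>
    intro k s hle hk hs
    obtain ⟨hl, hg, hd⟩ := drop_cons_facts nums1 k x xs hk
    subst hs
    rw [PySem.List.enumerate_cons]
    simp only [List.foldl_cons]
    have g1 : get2 (tbl nums1 nums2 (fun i j => decide (j = 0 ∧ i ≤ k))) ((k : Int) + 1 - 1) 0
        = dp nums1 nums2 k 0 :=
      get2_tbl' nums1 nums2 _ k 0 _ _ (by push_cast; ring) (by norm_num) (by omega) (by omega)
        (by simp)
    rw [g1]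
    have hv : nxt (dp nums1 nums2 k 0) x = dp nums1 nums2 (k + 1) 0 := by
      rw [dp_succ_zero, hg]
    rw [hv]
    have s1 := set2_tbl' nums1 nums2 (fun i j => decide (j = 0 ∧ i ≤ k)) (k + 1) 0
      ((k : Int) + 1) 0 (dp nums1 nums2 (k + 1) 0) (by push_cast; ring) (by norm_num)
      (by omega) (by omega) rfl
    rw [s1]
    have hc2 : tbl nums1 nums2
        (fun i' j' => decide (j' = 0 ∧ i' ≤ k) || (i' == k + 1 && j' == 0))
        = tbl nums1 nums2 (fun i j => decide (j = 0 ∧ i ≤ k + 1)) := by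
      apply tbl_congr
      intro i hi j hj
      rw [Bool.eq_iff_iff]
      simp only [Bool.or_eq_true, Bool.and_eq_true, beq_iff_eq, decide_eq_true_eq]
      omega
    rw [hc2]
    exact ih (k + 1) _ hl hd (by push_cast; ring)

lemma loopA2 (nums1 nums2 : List Int) :
    ∀ (ys : List Int) (k : Nat) (s : Int), k ≤ nums2.length → nums2.drop k = ys →
      s = (k : Int) + 1 →
    (PySem.List.enumerate ys s).foldl
        (fun f q => set2 f 0 q.1 (nxt (get2 f 0 (q.1 - 1)) q.2))
        (tbl nums1 nums2 (fun i j => decide (j = 0 ∨ (i = 0 ∧ j ≤ k))))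
      = tbl nums1 nums2 (fun i j => decide (j = 0 ∨ i = 0)) := by
  intro ys
  induction ys with
  | nil =>
    intro k s hle hk hs
    have h2 : k = nums2.length := by have := List.drop_eq_nil_iff.mp hk; omega
    rw [PySem.List.enumerate_nil, List.foldl_nil]
    apply tbl_congr
    intro i hi j hj
    rw [Bool.eq_iff_iff]; simp only [decide_eq_true_eq]; omega
  | cons y ys ih =>
    intro k s hle hk hs
    obtain ⟨hl, hg, hd⟩ := drop_cons_facts nums2 k y ys hk
    subst hs
    rw [PySem.List.enumerate_cons]
    simp only [List.foldl_cons]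
    have g1 : get2 (tbl nums1 nums2 (fun i j => decide (j = 0 ∨ (i = 0 ∧ j ≤ k)))) 0
        ((k : Int) + 1 - 1) = dp nums1 nums2 0 k :=
      get2_tbl' nums1 nums2 _ 0 k _ _ (by norm_num) (by push_cast; ring) (by omega) (by omega)
        (by simp)
    rw [g1]
    have hv : nxt (dp nums1 nums2 0 k) y = dp nums1 nums2 0 (k + 1) := by
      rw [dp_zero_succ, hg]
    rw [hv]
    have s1 := set2_tbl' nums1 nums2 (fun i j => decide (j = 0 ∨ (i = 0 ∧ j ≤ k))) 0 (k + 1)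
      0 ((k : Int) + 1) (dp nums1 nums2 0 (k + 1)) (by norm_num) (by push_cast; ring)
      (by omega) (by omega) rfl
    rw [s1]
    have hc2 : tbl nums1 nums2
        (fun i' j' => decide (j' = 0 ∨ (i' = 0 ∧ j' ≤ k)) || (i' == 0 && j' == k + 1))
        = tbl nums1 nums2 (fun i j => decide (j = 0 ∨ (i = 0 ∧ j ≤ k + 1))) := by
      apply tbl_congr
      intro i hi j hj
      rw [Bool.eq_iff_iff]
      simp only [Bool.or_eq_true, Bool.and_eq_true, beq_iff_eq, decide_eq_true_eq]
      omega
    rw [hc2]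
    exact ih (k + 1) _ hl hd (by push_cast; ring)

lemma loopA3_inner (nums1 nums2 : List Int) (k : Nat) (x : Int)
    (hk : k < nums1.length) (hx : nums1.getD k 0 = x) :
    ∀ (ys : List Int) (j : Nat) (s : Int), j ≤ nums2.length → nums2.drop j = ys →
      s = (j : Int) + 1 →
    (PySem.List.enumerate ys s).foldl
        (fun f q => set2 f ((k : Int) + 1) q.1
          (min (nxt (get2 f ((k : Int) + 1 - 1) q.1) x)
               (nxt (get2 f ((k : Int) + 1) (q.1 - 1)) q.2)))
        (tbl nums1 nums2
          (fun i' j' => decide (j' = 0 ∨ i' = 0 ∨ i' ≤ k ∨ (i' = k + 1 ∧ j' ≤ j))))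
      = tbl nums1 nums2
          (fun i' j' => decide (j' = 0 ∨ i' = 0 ∨ i' ≤ k ∨ i' = k + 1)) := by
  intro ys
  induction ys with
  | nil =>
    intro j s hle hj hs
    have h2 : j = nums2.length := by have := List.drop_eq_nil_iff.mp hj; omega
    rw [PySem.List.enumerate_nil, List.foldl_nil]
    apply tbl_congr
    intro i hi j' hj'
    rw [Bool.eq_iff_iff]; simp only [decide_eq_true_eq]; omega
  | cons y ys ih =>
    intro j s hle hj hs
    obtain ⟨hl, hg, hd⟩ := drop_cons_facts nums2 j y ys hj
    subst hs
    rw [PySem.List.enumerate_cons]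
    simp only [List.foldl_cons]
    have g1 : get2 (tbl nums1 nums2
          (fun i' j' => decide (j' = 0 ∨ i' = 0 ∨ i' ≤ k ∨ (i' = k + 1 ∧ j' ≤ j))))
        ((k : Int) + 1 - 1) ((j : Int) + 1) = dp nums1 nums2 k (j + 1) :=
      get2_tbl' nums1 nums2 _ k (j + 1) _ _ (by push_cast; ring) (by push_cast; ring)
        (by omega) (by omega) (by simp)
    rw [g1]
    have g2 : get2 (tbl nums1 nums2
          (fun i' j' => decide (j' = 0 ∨ i' = 0 ∨ i' ≤ k ∨ (i' = k + 1 ∧ j' ≤ j))))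
        ((k : Int) + 1) ((j : Int) + 1 - 1) = dp nums1 nums2 (k + 1) j :=
      get2_tbl' nums1 nums2 _ (k + 1) j _ _ (by push_cast; ring) (by push_cast; ring)
        (by omega) (by omega) (by simp)
    rw [g2]
    have hv : min (nxt (dp nums1 nums2 k (j + 1)) x) (nxt (dp nums1 nums2 (k + 1) j) y)
        = dp nums1 nums2 (k + 1) (j + 1) := by
      rw [dp_succ_succ, hx, hg]
    rw [hv]
    have s1 := set2_tbl' nums1 nums2
      (fun i' j' => decide (j' = 0 ∨ i' = 0 ∨ i' ≤ k ∨ (i' = k + 1 ∧ j' ≤ j)))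
      (k + 1) (j + 1) ((k : Int) + 1) ((j : Int) + 1) (dp nums1 nums2 (k + 1) (j + 1))
      (by push_cast; ring) (by push_cast; ring) (by omega) (by omega) rfl
    rw [s1]
    have hc2 : tbl nums1 nums2
        (fun i' j' => decide (j' = 0 ∨ i' = 0 ∨ i' ≤ k ∨ (i' = k + 1 ∧ j' ≤ j))
          || (i' == k + 1 && j' == j + 1))
        = tbl nums1 nums2
          (fun i' j' => decide (j' = 0 ∨ i' = 0 ∨ i' ≤ k ∨ (i' = k + 1 ∧ j' ≤ j + 1))) := by
      apply tbl_congr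
      intro i hi j' hj'
      rw [Bool.eq_iff_iff]
      simp only [Bool.or_eq_true, Bool.and_eq_true, beq_iff_eq, decide_eq_true_eq]
      omega
    rw [hc2]
    exact ih (j + 1) _ hl hd (by push_cast; ring)

lemma loopA3_outer (nums1 nums2 : List Int) :
    ∀ (xs : List Int) (k : Nat) (s : Int), k ≤ nums1.length → nums1.drop k = xs →
      s = (k : Int) + 1 →
    (PySem.List.enumerate xs s).foldl
        (fun f p => (PySem.List.enumerate nums2 1).foldl
          (fun f q => set2 f p.1 q.1
            (min (nxt (get2 f (p.1 - 1) q.1) p.2) (nxt (get2 f p.1 (q.1 - 1)) q.2))) f)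
        (tbl nums1 nums2 (fun i j => decide (j = 0 ∨ i = 0 ∨ i ≤ k)))
      = tbl nums1 nums2 (fun i j => decide (j = 0 ∨ i = 0 ∨ i ≤ nums1.length)) := by
  intro xs
  induction xs with
  | nil =>
    intro k s hle hk hs
    have h2 : k = nums1.length := by have := List.drop_eq_nil_iff.mp hk; omega
    rw [PySem.List.enumerate_nil, List.foldl_nil]
    apply tbl_congr
    intro i hi j hj
    rw [Bool.eq_iff_iff]; simp only [decide_eq_true_eq]; omega
  | cons x xs ih =>
    intro k s hle hk hs
    obtain ⟨hl, hg, hd⟩ := drop_cons_facts nums1 k x xs hk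
    subst hs
    rw [PySem.List.enumerate_cons]
    simp only [List.foldl_cons]
    have hc0 : tbl nums1 nums2 (fun i j => decide (j = 0 ∨ i = 0 ∨ i ≤ k))
        = tbl nums1 nums2
          (fun i' j' => decide (j' = 0 ∨ i' = 0 ∨ i' ≤ k ∨ (i' = k + 1 ∧ j' ≤ 0))) := by
      apply tbl_congr
      intro i hi j hj
      rw [Bool.eq_iff_iff]; simp only [decide_eq_true_eq]; omega
    rw [hc0]
    rw [loopA3_inner nums1 nums2 k x hl hg nums2 0 1 (by omega) rfl (by norm_num)]
    have hc1 : tbl nums1 nums2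
        (fun i' j' => decide (j' = 0 ∨ i' = 0 ∨ i' ≤ k ∨ i' = k + 1))
        = tbl nums1 nums2 (fun i j => decide (j = 0 ∨ i = 0 ∨ i ≤ k + 1)) := by
      apply tbl_congr
      intro i hi j hj
      rw [Bool.eq_iff_iff]; simp only [decide_eq_true_eq]; omega
    rw [hc1]
    exact ih (k + 1) _ hl hd (by push_cast; ring)

lemma mainA (nums1 nums2 : List Int) :
    minLargest nums1 nums2 = dp nums1 nums2 nums1.length nums2.length := by
  simp only [minLargest]
  rw [← tbl_false]
  have hA : tbl nums1 nums2 (fun _ _ => false)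
      = tbl nums1 nums2 (fun i j => decide (j = 0 ∧ i ≤ 0)) := by
    apply List.ext_getElem
    · simp [tbl]
    · intro i hA hB
      simp only [tbl, List.getElem_map, List.getElem_range]
      apply List.map_congr_left
      intro j hj
      by_cases hi0 : i = 0 <;> by_cases hj0 : j = 0 <;> simp [hi0, hj0, dp]
  rw [hA, loopA1 nums1 nums2 nums1 0 1 (by omega) rfl (by norm_num)]
  have hB : tbl nums1 nums2 (fun i j => decide (j = 0))
      = tbl nums1 nums2 (fun i j => decide (j = 0 ∨ (i = 0 ∧ j ≤ 0))) := by
    apply tbl_congr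
    intro i hi j hj
    rw [Bool.eq_iff_iff]; simp only [decide_eq_true_eq]; omega
  rw [hB, loopA2 nums1 nums2 nums2 0 1 (by omega) rfl (by norm_num)]
  have hC : tbl nums1 nums2 (fun i j => decide (j = 0 ∨ i = 0))
      = tbl nums1 nums2 (fun i j => decide (j = 0 ∨ i = 0 ∨ i ≤ 0)) := by
    apply tbl_congr
    intro i hi j hj
    rw [Bool.eq_iff_iff]; simp only [decide_eq_true_eq]; omega
  rw [hC, loopA3_outer nums1 nums2 nums1 0 1 (by omega) rfl (by norm_num)]
  exact get2_tbl' nums1 nums2 _ nums1.length nums2.length _ _ rfl rfl (by omega) (by omega)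
    (by simp)

-- ===== VERDICT (by name: the statement is the Claim_ definition above) =====
theorem minLargest_spec : Claim_equal_minLargest := by
  intro nums1 nums2 _
  unfold Spec_minLargest
  rw [mainA, altB]
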